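-- pv_equiv track=rewrite | github.com/tosi-mosi/university-labs | asym-crypto/asym_crypto_lab1.py | LehmerLow
-- ===== SOURCE A (Python) =====
-- def LehmerLow(state, gen_len):
--     res = hex(state&0xff)[2:]
--     frequencies = [0]*256
--     bigram_freq = [0]*(256*2)
--     for i in range(1, gen_len):
--         state = (((state*( (1<<16) + 1))) + 119)&(0xffffffff)
--         x = state&0xff
--         frequencies[x]+=1
--         res += "0" + hex(x)[2:] if x<16 else hex(x)[2:]#" " + hex(x)[2:]#
--     return (res, frequencies, gen_len)
-- ===== SOURCE B (Python) =====
-- def LehmerLow(state, gen_len):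
--     # Closed form: 65537 = 1 (mod 256) and 2**32 = 0 (mod 256), so the low byte of
--     # the i-th state is simply (state + 119*i) % 256 -- no 32-bit recurrence needed.
--     bytes_ = [(state + 119 * i) % 256 for i in range(1, gen_len)]
--     counts = {}
--     for b in bytes_:
--         counts[b] = counts.get(b, 0) + 1
--     frequencies = [counts.get(v, 0) for v in range(256)]
--     res = format(state & 0xff, 'x') + ''.join('%02x' % b for b in bytes_)
--     return (res, frequencies, gen_len)
-- ===== Notes on version B (the rewrite author's own statement) =====
-- stated objective: alternative
-- what changed: B replaces the 32-bit Lehmer state recurrence entirely by the closed form (state + 119*i) mod 256 for the emitted low bytes (since 65537 = 1 mod 256), builds the bytes as a list comprehension, counts them into a dict that is then expanded to the 256-entry table, and renders the hex string with a single join.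
import Mathlib
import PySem

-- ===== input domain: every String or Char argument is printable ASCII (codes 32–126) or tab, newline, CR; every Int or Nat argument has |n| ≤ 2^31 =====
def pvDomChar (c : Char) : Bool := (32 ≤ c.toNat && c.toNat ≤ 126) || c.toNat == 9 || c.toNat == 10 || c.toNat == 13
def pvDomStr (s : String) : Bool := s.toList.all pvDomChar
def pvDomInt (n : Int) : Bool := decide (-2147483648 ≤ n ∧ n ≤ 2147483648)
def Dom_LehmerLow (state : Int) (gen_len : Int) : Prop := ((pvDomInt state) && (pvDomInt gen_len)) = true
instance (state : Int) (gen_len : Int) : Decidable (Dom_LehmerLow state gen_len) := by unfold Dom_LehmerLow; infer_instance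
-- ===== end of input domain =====

-- B drops the 32-bit Lehmer recurrence: since 65537 ≡ 1 (mod 256), the emitted low
-- bytes are the closed form (state + 119*i) mod 256; counting goes through a dict and
-- the string through one join. Objective: alternative algorithm, same cost.

-- shared helper: hex(n)[2:] for a nonnegative Python int (lowercase, no prefix)
def hexChar (n : Nat) : Char :=
  if n < 10 then Char.ofNat (48 + n) else Char.ofNat (87 + n)

def hexAux : Nat → List Char → List Char
  | 0, acc => acc
  | n+1, acc => hexAux ((n+1) / 16) (hexChar ((n+1) % 16) :: acc)
decreasing_by exact Nat.div_lt_self (Nat.succ_pos n) (by norm_num)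

def hexStr (n : Nat) : String :=
  if n = 0 then "0" else String.ofList (hexAux n [])

-- ===== PORT A =====
def LehmerLow (state : Int) (gen_len : Int) : String × List Int × Int :=
  let res := hexStr (state.emod 256).toNat        -- hex(state & 0xff)[2:]
  let frequencies := List.replicate 256 (0 : Int)
  -- bigram_freq is built in A but never used; omitted from the state
  let fin := (PySem.List.pyRange 1 gen_len 1).foldl
    (fun (st : Int × String × List Int) _ =>
      let state := (st.1 * 65537 + 119).emod 4294967296   -- (state*((1<<16)+1)+119) & 0xffffffff
      let x := state.emod 256                              -- state & 0xff
      let freq := st.2.2.set x.toNat (st.2.2.getD x.toNat 0 + 1)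
      let res := st.2.1 ++ (if x < 16 then "0" ++ hexStr x.toNat else hexStr x.toNat)
      (state, res, freq))
    (state, res, frequencies)
  (fin.2.1, fin.2.2, gen_len)

-- ===== PORT B =====
-- '%02x' % b for a byte b
def pad2 (x : Int) : String :=
  if x < 16 then "0" ++ hexStr x.toNat else hexStr x.toNat

def LehmerLow_alt (state : Int) (gen_len : Int) : String × List Int × Int :=
  -- bytes_ = [(state + 119*i) % 256 for i in range(1, gen_len)]
  let bytes := (PySem.List.pyRange 1 gen_len 1).map (fun i => (state + 119 * i).emod 256)
  -- counts = {}; for b in bytes_: counts[b] = counts.get(b, 0) + 1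
  let counts := bytes.foldl (fun (d : PySem.Dict Int Int) b => d.insert b (d.getD b 0 + 1)) PySem.Dict.empty
  -- frequencies = [counts.get(v, 0) for v in range(256)]
  let frequencies := (PySem.List.pyRange 0 256 1).map (fun v => counts.getD v 0)
  -- res = format(state & 0xff, 'x') + ''.join('%02x' % b for b in bytes_)
  let res := hexStr (state.emod 256).toNat ++ String.join (bytes.map pad2)
  (res, frequencies, gen_len)

-- ===== PRECONDITION & SPEC =====
def Spec_LehmerLow (state : Int) (gen_len : Int) (out : String × List Int × Int) : Prop := out = LehmerLow_alt state gen_len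
instance (state : Int) (gen_len : Int) (out : String × List Int × Int) : Decidable (Spec_LehmerLow state gen_len out) := by unfold Spec_LehmerLow; infer_instance

-- ===== CLAIM (what is proved, stated in full; the proofs are below) =====
def Claim_equal_LehmerLow : Prop := ∀ (state : Int) (gen_len : Int), Dom_LehmerLow state gen_len → Spec_LehmerLow state gen_len (LehmerLow state gen_len)

-- ===== LEMMAS AND PROOFS =====

-- A's loop body (as folded over the range, ignoring the index)
def aStep (st : Int × String × List Int) : Int × String × List Int :=
  let state := (st.1 * 65537 + 119).emod 4294967296
  let x := state.emod 256
  let freq := st.2.2.set x.toNat (st.2.2.getD x.toNat 0 + 1)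
  let res := st.2.1 ++ (if x < 16 then "0" ++ hexStr x.toNat else hexStr x.toNat)
  (state, res, freq)

def bump (f : List Int) (b : Int) : List Int := f.set b.toNat (f.getD b.toNat 0 + 1)

def iterA : Nat → (Int × String × List Int) → (Int × String × List Int)
  | 0, st => st
  | n+1, st => iterA n (aStep st)

-- the bytes A's loop emits, read off its state recurrence
def lehmerTail (s : Int) : Nat → List Int
  | 0 => []
  | n+1 =>
    let s' := (s * 65537 + 119).emod 4294967296
    (s'.emod 256) :: lehmerTail s' n

lemma foldl_const_step {α : Type} (l : List α) (st : Int × String × List Int) :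
    l.foldl (fun st _ => aStep st) st = iterA l.length st := by
  induction l generalizing st with
  | nil => rfl
  | cons x t ih => simpa [List.foldl, iterA] using ih (aStep st)

lemma join_cons (s : String) (l : List String) :
    String.join (s :: l) = s ++ String.join l := by
  have h : ∀ (l : List String) (a b : String),
      l.foldl (· ++ ·) (a ++ b) = a ++ l.foldl (· ++ ·) b := by
    intro l
    induction l with
    | nil => simp
    | cons x t ih => intro a b; simpa [List.foldl, String.append_assoc] using ih a (b ++ x)
  simpa [String.join, List.foldl] using h l s ""

-- core invariant: n iterations of A's loop = A's passes over the emitted byte list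
lemma loop_eq (n : Nat) (s : Int) (res : String) (freq : List Int) :
    (iterA n (s, res, freq)).2 =
      (res ++ String.join ((lehmerTail s n).map pad2),
       (lehmerTail s n).foldl bump freq) := by
  induction n generalizing s res freq with
  | zero => simp [iterA, lehmerTail, String.join]
  | succ m ih =>
    have hA : aStep (s, res, freq) =
        ((s * 65537 + 119).emod 4294967296,
         res ++ pad2 (((s * 65537 + 119).emod 4294967296).emod 256),
         bump freq (((s * 65537 + 119).emod 4294967296).emod 256)) := rfl
    have hT : lehmerTail s (m + 1) =
        (((s * 65537 + 119).emod 4294967296).emod 256) ::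
          lehmerTail ((s * 65537 + 119).emod 4294967296) m := rfl
    rw [show iterA (m + 1) (s, res, freq) = iterA m (aStep (s, res, freq)) from rfl, hA, ih, hT]
    simp [List.foldl, join_cons, String.append_assoc]

-- 65537 ≡ 1 and 2^32 ≡ 0 (mod 256): one step moves the low byte by +119
lemma step_mod (s : Int) :
    ((s * 65537 + 119).emod 4294967296).emod 256 = (s + 119).emod 256 := by
  show (s * 65537 + 119) % 4294967296 % 256 = (s + 119) % 256
  rw [Int.emod_emod_of_dvd _ (by norm_num : (256 : Int) ∣ 4294967296),
    show s * 65537 + 119 = (s + 119) + s * 256 * 256 by ring]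
  generalize s * 256 = t
  omega

-- A's emitted bytes are the arithmetic progression (s + 119*(i+1)) mod 256
lemma tail_eq_ap (n : Nat) (s : Int) :
    lehmerTail s n = (List.range n).map (fun (i : Nat) => (s + 119 * ((i : Int) + 1)).emod 256) := by
  induction n generalizing s with
  | zero => rfl
  | succ m ih =>
    have hs' := step_mod s
    rw [show lehmerTail s (m+1) = (((s * 65537 + 119).emod 4294967296).emod 256)
        :: lehmerTail ((s * 65537 + 119).emod 4294967296) m from rfl,
      ih, List.range_succ_eq_map]
    simp only [List.map_cons, List.map_map]
    generalize hP : (s * 65537 + 119).emod 4294967296 = t at hs' ⊢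
    refine List.cons_eq_cons.mpr ⟨?_, ?_⟩
    · push_cast
      omega
    · apply List.map_congr_left
      intro i _
      simp only [Function.comp]
      push_cast
      rw [show s + 119 * ((i : Int) + 1 + 1) = (s + 119) + 119 * ((i : Int) + 1) by ring]
      exact Int.ModEq.add_right _ hs'

-- every emitted byte is in [0, 256)
lemma tail_mem_range (n : Nat) (s : Int) :
    ∀ b ∈ lehmerTail s n, 0 ≤ b ∧ b < 256 := by
  rw [tail_eq_ap]
  intro b hb
  simp only [List.mem_map] at hb
  obtain ⟨i, _, rfl⟩ := hb
  exact ⟨Int.emod_nonneg _ (by norm_num), Int.emod_lt_of_pos _ (by norm_num)⟩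

-- the frequency fold over any byte list yields the per-value counts
lemma freq_fold (l : List Int) (g : Nat → Int)
    (hl : ∀ b ∈ l, 0 ≤ b ∧ b < 256) :
    l.foldl bump ((List.range 256).map g)
      = (List.range 256).map (fun (v : Nat) => g v + (l.count ((v : Int)) : Int)) := by
  induction l generalizing g with
  | nil => simp
  | cons b t ih =>
    have hb := hl b (List.mem_cons_self ..)
    have hset : bump ((List.range 256).map g) b
        = (List.range 256).map (fun (v : Nat) => if (v : Int) = b then g v + 1 else g v) := by
      unfold bump
      have hget : ((List.range 256).map g).getD b.toNat 0 = g b.toNat := by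
        rw [List.getD_eq_getElem?_getD]
        simp [show b.toNat < 256 by omega]
      rw [hget]
      apply List.ext_getElem
      · simp
      · intro k h1 h2
        have hk : k < 256 := by simpa using h2
        rw [List.getElem_set]
        simp only [List.getElem_map, List.getElem_range]
        by_cases hkb : b.toNat = k
        · have hkb' : (k : Int) = b := by omega
          rw [if_pos hkb, if_pos hkb', ← hkb]
        · have hkb' : ¬((k : Int) = b) := by omega
          rw [if_neg hkb, if_neg hkb']
    rw [List.foldl_cons, hset,
      ih (fun (v : Nat) => if (v : Int) = b then g v + 1 else g v)
        (fun x hx => hl x (List.mem_cons_of_mem _ hx))]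
    apply List.map_congr_left
    intro v _
    by_cases hv : (v : Int) = b
    · simp [hv]
      ring
    · simp [hv, List.count_cons]
      exact Ne.symm hv

-- B's dict pass is Counter; expanding it over range(256) gives the same counts
lemma dict_freq (l : List Int) :
    (PySem.List.pyRange 0 256 1).map
        (fun v => (l.foldl (fun (d : PySem.Dict Int Int) b => d.insert b (d.getD b 0 + 1))
          PySem.Dict.empty).getD v 0)
      = (List.range 256).map (fun (v : Nat) => (0 : Int) + (l.count ((v : Int)) : Int)) := by
  rw [PySem.Dict.foldl_insert_getD_add_one_eq_counter, PySem.List.pyRange_one, List.map_map]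
  simp only [show ((256 : Int) - 0).toNat = 256 from rfl]
  apply List.map_congr_left
  intro k _
  simp [PySem.Dict.getD_counter]

theorem equal_core (state gen_len : Int) :
    LehmerLow state gen_len = LehmerLow_alt state gen_len := by
  show (let fin := (PySem.List.pyRange 1 gen_len 1).foldl (fun st _ => aStep st)
          (state, hexStr (state.emod 256).toNat, List.replicate 256 (0 : Int))
        (fin.2.1, fin.2.2, gen_len)) =
       (let bytes := (PySem.List.pyRange 1 gen_len 1).map (fun i => (state + 119 * i).emod 256)
        (hexStr (state.emod 256).toNat ++ String.join (bytes.map pad2),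
         (PySem.List.pyRange 0 256 1).map
           (fun v => (bytes.foldl (fun (d : PySem.Dict Int Int) b => d.insert b (d.getD b 0 + 1))
             PySem.Dict.empty).getD v 0),
         gen_len))
  have hlen : (PySem.List.pyRange 1 gen_len 1).length = (gen_len - 1).toNat :=
    PySem.List.length_pyRange_one 1 gen_len
  have hbytes : (PySem.List.pyRange 1 gen_len 1).map (fun i => (state + 119 * i).emod 256)
      = lehmerTail state (gen_len - 1).toNat := by
    rw [tail_eq_ap, PySem.List.pyRange_one, List.map_map]
    apply List.map_congr_left
    intro i _
    simp only [Function.comp]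
    congr 1
    ring
  have hrep : List.replicate 256 (0 : Int) = (List.range 256).map (fun _ => (0 : Int)) := by
    rw [List.map_const', List.length_range]
  simp only [foldl_const_step, hlen, loop_eq, hbytes, dict_freq, hrep,
    freq_fold _ _ (tail_mem_range _ _)]

-- ===== VERDICT (by name: the statement is the Claim_ definition above) =====
theorem LehmerLow_spec : Claim_equal_LehmerLow := by
  intro state gen_len _
  unfold Spec_LehmerLow
  exact equal_core state gen_len
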